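-- pv_equiv track=rewrite | github.com/cmdrkotori/everybody-codes | 2025/06.py | docat
-- ===== SOURCE A (Python) =====
-- def docat(men,mentor,novice):
--     pairs = 0
--     mentors = 0
--     possible = mentor+novice
--     for m in men:
--         if m not in possible:
--             continue
--         if m == mentor:
--             mentors += 1
--         if m == novice:
--             pairs += mentors
--     return pairs
-- ===== SOURCE B (Python) =====
-- def docat(men, mentor, novice):
--     # prefix-count table: pref[k] = number of mentor characters among men[:k]
--     pref = [0]
--     for ch in men:
--         pref.append(pref[-1] + (ch == mentor))
--     return sum(pref[i + 1] for i, c in enumerate(men) if c == novice)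
-- ===== Notes on version B (the rewrite author's own statement) =====
-- stated objective: alternative
-- what changed: Replaces A's single incremental mentors/pairs tally with a two-pass prefix-count scheme: build a prefix-count table of mentor occurrences, then sum the inclusive prefix counts at every novice position via enumerate.
import Mathlib
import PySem

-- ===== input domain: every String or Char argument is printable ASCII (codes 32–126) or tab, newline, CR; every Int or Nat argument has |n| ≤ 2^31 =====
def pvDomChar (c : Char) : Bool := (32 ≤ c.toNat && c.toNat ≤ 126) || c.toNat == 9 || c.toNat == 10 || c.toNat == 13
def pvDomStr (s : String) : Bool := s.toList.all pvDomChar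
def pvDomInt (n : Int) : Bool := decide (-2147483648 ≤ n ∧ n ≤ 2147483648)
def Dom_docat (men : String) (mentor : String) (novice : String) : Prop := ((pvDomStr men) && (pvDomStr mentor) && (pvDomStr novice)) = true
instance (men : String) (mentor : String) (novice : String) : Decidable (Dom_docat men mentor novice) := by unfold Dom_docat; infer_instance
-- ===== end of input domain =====

-- B replaces A's incremental mentors/pairs tally with a two-pass prefix-count table summed
-- at the novice positions (alternative decomposition, same O(n) cost; return values proved equal).

-- ===== PORT A =====
-- loop state: (pairs, mentors); `m in possible` with m a 1-char string is the substring
-- test PySem.Chars.isIn [m] (mentor+novice) — exact.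
def docat (men : String) (mentor : String) (novice : String) : Int :=
  let possible := mentor.toList ++ novice.toList
  (men.toList.foldl (fun (st : Int × Int) m =>
      if ¬ PySem.Chars.isIn [m] possible then st
      else
        let mentors := if [m] = mentor.toList then st.2 + 1 else st.2
        let pairs := if [m] = novice.toList then st.1 + mentors else st.1
        (pairs, mentors)) ((0 : Int), (0 : Int))).1

-- ===== PORT B =====
-- pref built by appending pref[-1] + (ch == mentor); then sum(pref[i+1] for i, c in
-- enumerate(men) if c == novice) as a foldl over PySem.List.enumerate.
def docat_alt (men : String) (mentor : String) (novice : String) : Int :=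
  let pref : List Int := men.toList.foldl
    (fun pref ch => pref ++ [PySem.List.pyGetD pref (-1) 0 +
        (if [ch] = mentor.toList then 1 else 0)]) [(0 : Int)]
  (PySem.List.enumerate men.toList 0).foldl
    (fun s ic => if [ic.2] = novice.toList then s + PySem.List.pyGetD pref (ic.1 + 1) 0 else s)
    (0 : Int)

-- ===== PRECONDITION & SPEC =====
def Spec_docat (men : String) (mentor : String) (novice : String) (out : Int) : Prop := out = docat_alt men mentor novice
instance (men : String) (mentor : String) (novice : String) (out : Int) : Decidable (Spec_docat men mentor novice out) := by unfold Spec_docat; infer_instance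

-- ===== CLAIM (what is proved, stated in full; the proofs are below) =====
def Claim_equal_docat : Prop := ∀ (men : String) (mentor : String) (novice : String), Dom_docat men mentor novice → Spec_docat men mentor novice (docat men mentor novice)


-- ===== LEMMAS AND PROOFS =====

-- proof-side names for the two loop bodies (definitionally the ports' folds)
def stepA (ml nl : List Char) (st : Int × Int) (m : Char) : Int × Int :=
  if ¬ PySem.Chars.isIn [m] (ml ++ nl) then st
  else
    let mentors := if [m] = ml then st.2 + 1 else st.2
    let pairs := if [m] = nl then st.1 + mentors else st.1
    (pairs, mentors)

def prefFold (ml : List Char) (l : List Char) : List Int :=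
  l.foldl (fun pref ch => pref ++ [PySem.List.pyGetD pref (-1) 0 +
      (if [ch] = ml then 1 else 0)]) [(0 : Int)]

theorem docat_eq (men mentor novice : String) :
    docat men mentor novice
      = (men.toList.foldl (stepA mentor.toList novice.toList) ((0 : Int), (0 : Int))).1 := rfl

theorem docat_alt_eq (men mentor novice : String) :
    docat_alt men mentor novice
      = (PySem.List.enumerate men.toList 0).foldl
          (fun s ic => if [ic.2] = novice.toList then
              s + PySem.List.pyGetD (prefFold mentor.toList men.toList) (ic.1 + 1) 0 else s)
          (0 : Int) := rfl

-- number of mentor characters in l (c == mentor for a 1-char c ↔ [c] = mentor.toList)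
def mcnt (ml : List Char) (l : List Char) : Int :=
  (l.countP (fun c => decide ([c] = ml)) : Int)

theorem mcnt_append_singleton (ml : List Char) (l : List Char) (c : Char) :
    mcnt ml (l ++ [c]) = mcnt ml l + (if [c] = ml then 1 else 0) := by
  simp only [mcnt, List.countP_append]
  split_ifs with h
  · rw [← h]; simp
  · simp [h]

-- a char equal to mentor or novice is `in possible`
theorem isIn_of_eq_left (ml nl : List Char) (c : Char) (h : [c] = ml) :
    PySem.Chars.isIn [c] (ml ++ nl) = true := by
  rw [PySem.Chars.isIn_iff_infix]
  exact h ▸ (List.prefix_append ml nl).isInfix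

theorem isIn_of_eq_right (ml nl : List Char) (c : Char) (h : [c] = nl) :
    PySem.Chars.isIn [c] (ml ++ nl) = true := by
  rw [PySem.Chars.isIn_iff_infix]
  exact h ▸ (List.suffix_append ml nl).isInfix

-- A's loop body, with the `continue` guard eliminated
theorem stepA_eq (ml nl : List Char) (st : Int × Int) (c : Char) :
    stepA ml nl st c
      = ((if [c] = nl then st.1 + (if [c] = ml then st.2 + 1 else st.2) else st.1),
         (if [c] = ml then st.2 + 1 else st.2)) := by
  unfold stepA
  by_cases hin : PySem.Chars.isIn [c] (ml ++ nl) = true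
  · simp [hin]
  · have hm : ¬ ([c] = ml) := fun h => hin (isIn_of_eq_left ml nl c h)
    have hn : ¬ ([c] = nl) := fun h => hin (isIn_of_eq_right ml nl c h)
    simp [hin, hm, hn]

-- the mentors component of A's state is mcnt
theorem foldA_snd (ml nl : List Char) (l : List Char) :
    (l.foldl (stepA ml nl) ((0 : Int), (0 : Int))).2 = mcnt ml l := by
  induction l using List.reverseRecOn with
  | nil => rfl
  | append_singleton l c ih =>
    rw [List.foldl_append, List.foldl_cons, List.foldl_nil, stepA_eq,
        mcnt_append_singleton, ← ih]
    split_ifs <;> simp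

-- B's pref table: shape (ends with the full count, length = len + 1)
theorem prefFold_shape (ml : List Char) (l : List Char) :
    (∃ xs, prefFold ml l = xs ++ [mcnt ml l]) ∧ (prefFold ml l).length = l.length + 1 := by
  induction l using List.reverseRecOn with
  | nil => exact ⟨⟨[], rfl⟩, rfl⟩
  | append_singleton l c ih =>
    obtain ⟨⟨xs, hx⟩, hlen⟩ := ih
    have hstep : prefFold ml (l ++ [c])
        = prefFold ml l ++ [PySem.List.pyGetD (prefFold ml l) (-1) 0 +
            (if [c] = ml then 1 else 0)] := by
      unfold prefFold
      rw [List.foldl_append, List.foldl_cons, List.foldl_nil]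
    rw [hstep, hx, PySem.List.pyGetD_neg_one_append_singleton]
    constructor
    · exact ⟨xs ++ [mcnt ml l], by rw [mcnt_append_singleton, List.append_assoc]⟩
    · have : (xs ++ [mcnt ml l]).length = l.length + 1 := by rw [← hx]; exact hlen
      simp_all

-- B's pref step equation
theorem prefFold_append (ml : List Char) (l : List Char) (c : Char) :
    prefFold ml (l ++ [c]) = prefFold ml l ++ [mcnt ml (l ++ [c])] := by
  obtain ⟨⟨xs, hx⟩, _⟩ := prefFold_shape ml l
  have hstep : prefFold ml (l ++ [c])
      = prefFold ml l ++ [PySem.List.pyGetD (prefFold ml l) (-1) 0 +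
          (if [c] = ml then 1 else 0)] := by
    unfold prefFold
    rw [List.foldl_append, List.foldl_cons, List.foldl_nil]
  rw [hstep, mcnt_append_singleton]
  rw [hx, PySem.List.pyGetD_neg_one_append_singleton, ← hx]

-- reading pref at i + 1 gives the inclusive prefix count
theorem prefFold_getD (ml : List Char) (l : List Char) (k : Nat) (hk : k < l.length) :
    PySem.List.pyGetD (prefFold ml l) ((k : Int) + 1) 0 = mcnt ml (l.take (k + 1)) := by
  induction l using List.reverseRecOn generalizing k with
  | nil => simp at hk
  | append_singleton l c ih =>
    have hcast : ((k : Int) + 1) = ((k + 1 : Nat) : Int) := by push_cast; ring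
    rw [prefFold_append, hcast, PySem.List.pyGetD_natCast, List.getD_eq_getElem?_getD]
    have hlen := (prefFold_shape ml l).2
    rcases Nat.lt_or_ge k l.length with hlt | hge
    · rw [List.getElem?_append_left (by omega)]
      have := ih k hlt
      rw [hcast, PySem.List.pyGetD_natCast, List.getD_eq_getElem?_getD] at this
      rw [this, List.take_append_of_le_length (by omega)]
    · have hkeq : k = l.length := by
        have : k < (l ++ [c]).length := hk
        simp at this; omega
      subst hkeq
      rw [List.getElem?_append_right (by omega)]
      have h1 : l.length + 1 - (prefFold ml l).length = 0 := by omega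
      rw [h1]
      have htake : (l ++ [c]).take (l.length + 1) = l ++ [c] :=
        List.take_of_length_le (by simp)
      simp [htake]

-- B's sum (in prefix-count form) equals A's pairs component
theorem sum_eq_foldA (ml nl : List Char) (l : List Char) :
    (PySem.List.enumerate l 0).foldl
      (fun s ic => if [ic.2] = nl then s + mcnt ml (l.take (ic.1.toNat + 1)) else s) (0 : Int)
    = (l.foldl (stepA ml nl) ((0 : Int), (0 : Int))).1 := by
  induction l using List.reverseRecOn with
  | nil => rfl
  | append_singleton l c ih =>
    have henum : PySem.List.enumerate (l ++ [c]) 0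
        = PySem.List.enumerate l 0 ++ [((l.length : Int), c)] := by
      rw [PySem.List.enumerate_append]
      simp [PySem.List.enumerate_cons, PySem.List.enumerate_nil]
    rw [henum, List.foldl_append, List.foldl_cons, List.foldl_nil,
        List.foldl_append, List.foldl_cons, List.foldl_nil, stepA_eq]
    have hcongr : (PySem.List.enumerate l 0).foldl
        (fun s ic => if [ic.2] = nl then s + mcnt ml ((l ++ [c]).take (ic.1.toNat + 1)) else s)
        (0 : Int)
        = (PySem.List.enumerate l 0).foldl
        (fun s ic => if [ic.2] = nl then s + mcnt ml (l.take (ic.1.toNat + 1)) else s)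
        (0 : Int) := by
      apply PySem.List.foldl_congr_mem
      intro acc x hx
      rw [PySem.List.mem_enumerate_iff] at hx
      obtain ⟨j, hjlt, rfl⟩ := hx
      simp only [zero_add, Int.toNat_natCast]
      rw [List.take_append_of_le_length (by omega)]
    rw [hcongr, ih]
    have htoNat : ((l.length : Int)).toNat = l.length := Int.toNat_natCast _
    rw [htoNat]
    have htake : (l ++ [c]).take (l.length + 1) = l ++ [c] :=
      List.take_of_length_le (by simp)
    rw [htake, mcnt_append_singleton, ← foldA_snd ml nl l]
    set st := l.foldl (stepA ml nl) ((0 : Int), (0 : Int))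
    split_ifs <;> simp

-- ===== VERDICT (by name: the statement is the Claim_ definition above) =====
theorem docat_spec : Claim_equal_docat := by
  intro men mentor novice _
  unfold Spec_docat
  rw [docat_eq, docat_alt_eq, ← sum_eq_foldA mentor.toList novice.toList men.toList]
  apply PySem.List.foldl_congr_mem
  intro acc x hx
  rw [PySem.List.mem_enumerate_iff] at hx
  obtain ⟨k, hklt, rfl⟩ := hx
  simp only [zero_add, Int.toNat_natCast]
  rw [prefFold_getD mentor.toList men.toList k hklt]
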